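-- pv_equiv track=rewrite | github.com/cspyo/python-for-coding-test | DFS_BFS/2023/13-18.py | recursion
-- ===== SOURCE A (Python) =====
-- def is_balanced(arr):
--     return arr.count("(") == arr.count(")")
--
-- def is_right(arr):
--     is_right = 0
--     for item in arr:
--         if (item == "("):
--             is_right += 1
--         else:
--             is_right -= 1
--         if (is_right < 0):
--             return False
--     return True
--
-- def recursion(arr):
--     if not arr or is_right(arr):
--         return arr
--
--     # 문자열 분리
--     for i in range(1, len(arr)+1):
--         u = arr[:i]
--         if (is_balanced(u)):
--             v = arr[i:]
--             if (is_right(u)):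
--                 return u + recursion(v)
--             else:
--                 new_str = "("
--                 new_str += recursion(v)
--                 new_str += ")"
--
--                 for item in u[1:-1]:
--                     if item == '':
--                         continue
--                     if (item == "("):
--                         new_str += ")"
--                     else:
--                         new_str += "("
--                 return new_str
-- ===== SOURCE B (Python) =====
-- def recursion(arr):
--     if not arr:
--         return arr
--     split = 0
--     u_right = False
--     diff = 0   # '(' count minus ')' count so far
--     bal = 0    # "is_right" balance: +1 for '(', -1 for anything else
--     neg = False
--     for i, ch in enumerate(arr, 1):
--         if ch == "(":
--             diff += 1
--             bal += 1
--         else: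
--             bal -= 1
--             if ch == ")":
--                 diff -= 1
--         if bal < 0:
--             neg = True
--         if split == 0 and diff == 0:
--             split = i
--             u_right = not neg
--         if split and neg:
--             break  # both answers known: first balanced prefix found, arr not "right"
--     if not neg:
--         return arr
--     if split == 0:
--         raise ValueError("no prefix with balanced parentheses")
--     u, v = arr[:split], arr[split:]
--     if u_right:
--         return u + recursion(v)
--     return "(" + recursion(v) + ")" + "".join(")" if c == "(" else "(" for c in u[1:-1])
-- ===== Notes on version B (the rewrite author's own statement) =====
-- stated objective: alternative
-- what changed: B finds the minimal balanced prefix and both is_right answers in ONE combined pass with an early break (running paren-balance, running is_right balance, sticky negative flag), instead of A's loop that calls count() on every growing prefix plus separate is_right scans.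
-- outside the precondition, e.g. on recursion(')'): A returns None, B raises ValueError; on recursion('())'): A raises TypeError, B raises ValueError
import Mathlib
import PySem

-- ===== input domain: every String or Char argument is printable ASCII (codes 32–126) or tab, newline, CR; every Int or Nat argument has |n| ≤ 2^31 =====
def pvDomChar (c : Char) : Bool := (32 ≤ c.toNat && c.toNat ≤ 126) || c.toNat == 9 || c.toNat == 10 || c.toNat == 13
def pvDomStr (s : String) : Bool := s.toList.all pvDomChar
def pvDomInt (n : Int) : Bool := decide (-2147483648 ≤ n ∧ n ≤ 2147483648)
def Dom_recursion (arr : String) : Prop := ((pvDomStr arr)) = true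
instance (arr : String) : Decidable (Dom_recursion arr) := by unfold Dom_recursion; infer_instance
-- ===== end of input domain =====

-- B replaces A's prefix search (count() on every prefix plus separate is_right passes) by ONE
-- combined pass tracking both running balances, with an early break; objective: alternative.

-- ===== PORT A =====
def pvIsBalanced (l : List Char) : Bool := l.count '(' == l.count ')'

def pvIsRightGo : List Char → Int → Bool
  | [], _ => true
  | c :: rest, k =>
    let k' := if c = '(' then k + 1 else k - 1
    if k' < 0 then false else pvIsRightGo rest k'

def pvIsRight (l : List Char) : Bool := pvIsRightGo l 0

-- Python's `for i in range(1, len(arr)+1): if is_balanced(arr[:i]): return i`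
def pvSplitLoop (arr : List Char) (i : Nat) : Option Nat :=
  if i ≤ arr.length then
    if pvIsBalanced (arr.take i) then some i else pvSplitLoop arr (i + 1)
  else none
termination_by arr.length + 1 - i

theorem pvSplitLoop_bounds (arr : List Char) (i j : Nat)
    (h : pvSplitLoop arr i = some j) : i ≤ j ∧ j ≤ arr.length := by
  fun_induction pvSplitLoop arr i with
  | case1 i hle hb => simp only [Option.some.injEq] at h; omega
  | case2 i hle hb ih => have := ih h; omega
  | case3 i hle => simp at h

def pvFlip (c : Char) : Char := if c = '(' then ')' else '('

def pvRecGo (arr : List Char) : List Char :=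
  if arr = [] ∨ pvIsRight arr then arr
  else
    match h : pvSplitLoop arr 1 with
    | none => []  -- Python A falls off the function and returns None here; excluded by Pre_
    | some i =>
      let u := arr.take i
      let v := arr.drop i
      if pvIsRight u then u ++ pvRecGo v
      else
        -- u[1:-1] = (u.drop 1).dropLast (exact for u ≠ []); the '' test in A's loop is dead code
        ((u.drop 1).dropLast).foldl (fun s c => s ++ [pvFlip c]) (('(' :: pvRecGo v) ++ [')'])
termination_by arr.length
decreasing_by
  all_goals
    have hb := pvSplitLoop_bounds arr 1 i h
    have : arr ≠ [] := by rintro rfl; simp at hb; omega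
    simp [List.length_drop]
    cases arr with
    | nil => exact absurd rfl this
    | cons a t => simp; omega

def recursion (arr : String) : String := String.ofList (pvRecGo arr.toList)

-- ===== PORT B =====
-- single pass: diff = paren balance, bal = is_right balance, neg = bal went negative (sticky),
-- found = first position where diff hit 0, paired with (not neg) at that moment
def pvScanGo : List Char → Nat → Int → Int → Bool → Option (Nat × Bool) → Option (Nat × Bool) × Bool
  | [], _, _, _, neg, found => (found, neg)
  | c :: rest, i, diff, bal, neg, found =>
    let diff' := if c = '(' then diff + 1 else if c = ')' then diff - 1 else diff
    let bal' := if c = '(' then bal + 1 else bal - 1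
    let neg' := neg || decide (bal' < 0)
    let found' := if found.isNone && diff' == 0 then some (i + 1, !neg') else found
    -- `if split and neg: break`
    if found'.isSome && neg' then (found', neg')
    else pvScanGo rest (i + 1) diff' bal' neg' found'

theorem pvScanGo_found_some (l : List Char) (i : Nat) (d b : Int) (neg : Bool) (p : Nat × Bool) :
    (pvScanGo l i d b neg (some p)).1 = some p := by
  induction l generalizing i d b neg with
  | nil => rfl
  | cons c rest ih =>
    simp only [pvScanGo, Option.isNone_some, Bool.false_and, Bool.false_eq_true, if_false,
      Option.isSome_some, Bool.true_and]
    by_cases hex : (neg || decide ((if c = '(' then b + 1 else b - 1) < 0)) = true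
    · rw [if_pos hex]
    · rw [if_neg hex]
      exact ih _ _ _ _

theorem pvScanGo_found_bounds (l : List Char) (i : Nat) (d b : Int) (neg : Bool)
    (j : Nat) (r : Bool) (h : (pvScanGo l i d b neg none).1 = some (j, r)) :
    i < j ∧ j ≤ i + l.length := by
  induction l generalizing i d b neg with
  | nil => simp [pvScanGo] at h
  | cons c rest ih =>
    simp only [pvScanGo] at h
    by_cases hz : (if c = '(' then d + 1 else if c = ')' then d - 1 else d) = 0
    · simp only [hz, beq_self_eq_true, Option.isNone_none, Bool.true_and, if_true,
        Option.isSome_some] at h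
      by_cases hex : (neg || decide ((if c = '(' then b + 1 else b - 1) < 0)) = true
      · rw [if_pos (by simp [hex])] at h
        simp only [Option.some.injEq, Prod.mk.injEq] at h
        obtain ⟨rfl, rfl⟩ := h
        simp
      · rw [if_neg (by simp [Bool.eq_false_iff.2 (fun hc => hex hc)])] at h
        rw [pvScanGo_found_some] at h
        simp only [Option.some.injEq, Prod.mk.injEq] at h
        obtain ⟨rfl, rfl⟩ := h
        simp
    · simp only [beq_iff_eq, hz, if_false, Option.isNone_none, Bool.true_and,
        Option.isSome_none, Bool.false_and, Bool.false_eq_true] at h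
      have := ih _ _ _ _ h
      simp
      omega

def pvRecBGo (arr : List Char) : List Char :=
  match h : pvScanGo arr 0 0 0 false none with
  | (found, neg) =>
    if arr = [] then []
    else if neg = false then arr
    else
      match hf : found with
      | none => []  -- B raises ValueError here; excluded by Pre_
      | some (split, uRight) =>
        let u := arr.take split
        let v := arr.drop split
        if uRight then u ++ pvRecBGo v
        else '(' :: (pvRecBGo v ++ ')' :: ((u.drop 1).dropLast).map (fun c => if c = '(' then ')' else '('))
termination_by arr.length
decreasing_by
  all_goals
    have hb : (pvScanGo arr 0 0 0 false none).1 = some (split, uRight) := by rw [h]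
    have := pvScanGo_found_bounds arr 0 0 0 false split uRight hb
    simp [List.length_drop]
    cases arr with
    | nil => simp at *
    | cons a t => simp; omega

def recursion_alt (arr : String) : String := String.ofList (pvRecBGo arr.toList)

-- ===== PRECONDITION & SPEC =====
-- Pre_ excludes exactly the inputs on which Python A does not return a string: it either falls
-- off the split loop returning None (no prefix with equally many '(' and ')') or a recursive
-- call does so, making the caller's `u + recursion(v)` raise TypeError.
def pvPd (l : List Char) : Int := (l.count '(' : Int) - (l.count ')' : Int)
def pvRbSum (l : List Char) : Int := (l.map (fun c => if c = '(' then (1 : Int) else -1)).sum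

def Pre_recursion (arr : String) : Prop :=
  ∃ p < arr.toList.length + 1, pvPd (arr.toList.take p) = 0 ∧
    (p = arr.toList.length ∨
      ∀ j < arr.toList.length - p + 1, 0 ≤ pvRbSum ((arr.toList.drop p).take j))
instance (arr : String) : Decidable (Pre_recursion arr) := by unfold Pre_recursion; infer_instance

def pvWitness_recursion : String := ")("

def Spec_recursion (arr : String) (out : String) : Prop := out = recursion_alt arr
instance (arr : String) (out : String) : Decidable (Spec_recursion arr out) := by unfold Spec_recursion; infer_instance

-- ===== CLAIM (what is proved, stated in full; the proofs are below) =====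
def Claim_equal_recursion : Prop := ∀ (arr : String), Dom_recursion arr → Pre_recursion arr → Spec_recursion arr (recursion arr)

-- ===== LEMMAS AND PROOFS =====

-- spec-level one-pass find of the first prefix with equal paren counts (position + running diff)
def sFind : List Char → Int → Nat → Option Nat
  | [], _, _ => none
  | c :: r, d, i =>
    let d' := if c = '(' then d + 1 else if c = ')' then d - 1 else d
    if d' = 0 then some (i + 1) else sFind r d' (i + 1)

def pvDelta (c : Char) : Int := if c = '(' then 1 else if c = ')' then -1 else 0

theorem pvPd_append_single (pre : List Char) (c : Char) :
    pvPd (pre ++ [c]) = pvPd pre + pvDelta c := by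
  simp only [pvPd, pvDelta, List.count_append]
  by_cases h1 : c = '('
  · subst h1; simp; omega
  · by_cases h2 : c = ')'
    · subst h2; simp [h1]; omega
    · simp [h1, h2]

theorem pvIsBalanced_iff (l : List Char) : pvIsBalanced l = true ↔ pvPd l = 0 := by
  simp only [pvIsBalanced, pvPd, beq_iff_eq]
  omega

theorem sFind_bounds (l : List Char) (d : Int) (i j : Nat)
    (h : sFind l d i = some j) : i < j ∧ j ≤ i + l.length := by
  induction l generalizing d i with
  | nil => simp only [sFind] at h; cases h
  | cons c r ih =>
    simp only [sFind] at h
    by_cases hz : (if c = '(' then d + 1 else if c = ')' then d - 1 else d) = 0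
    · rw [if_pos hz] at h
      simp only [Option.some.injEq] at h; simp; omega
    · rw [if_neg hz] at h
      have := ih _ _ h; simp; omega

theorem splitStruct (rest pre : List Char) :
    pvSplitLoop (pre ++ rest) (pre.length + 1) = sFind rest (pvPd pre) pre.length := by
  induction rest generalizing pre with
  | nil => rw [pvSplitLoop]; simp [sFind]
  | cons c r ih =>
    rw [pvSplitLoop, sFind]
    have hle : pre.length + 1 ≤ (pre ++ c :: r).length := by simp
    have htake : (pre ++ c :: r).take (pre.length + 1) = pre ++ [c] := by
      rw [List.take_append]
      simp
    have hd : (if c = '(' then pvPd pre + 1 else if c = ')' then pvPd pre - 1 else pvPd pre)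
        = pvPd pre + pvDelta c := by
      unfold pvDelta; split_ifs <;> ring
    rw [if_pos hle, htake]
    simp only [hd]
    by_cases hz : pvPd pre + pvDelta c = 0
    · have : pvIsBalanced (pre ++ [c]) = true := by
        rw [pvIsBalanced_iff, pvPd_append_single]; exact hz
      simp [this, hz]
    · have hbal : pvIsBalanced (pre ++ [c]) = false := by
        rw [Bool.eq_false_iff]
        intro hb
        exact hz (by rw [← pvPd_append_single]; exact (pvIsBalanced_iff _).1 hb)
      have harr : pre ++ c :: r = (pre ++ [c]) ++ r := by simp
      have hlen : pre.length + 1 + 1 = (pre ++ [c]).length + 1 := by simp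
      rw [hbal]
      simp only [Bool.false_eq_true, if_false, if_neg hz]
      rw [harr, hlen, ih (pre ++ [c]), pvPd_append_single]
      simp

theorem splitLoop_eq_sFind (arr : List Char) : pvSplitLoop arr 1 = sFind arr 0 0 := by
  have := splitStruct arr []
  simpa [pvPd] using this

theorem pvScanGo_snd_true (l : List Char) (i : Nat) (d b : Int) (f : Option (Nat × Bool)) :
    (pvScanGo l i d b true f).2 = true := by
  induction l generalizing i d b f with
  | nil => rfl
  | cons c r ih =>
    simp only [pvScanGo, Bool.true_or, Bool.and_true]
    split_ifs <;> first | rfl | exact ih _ _ _ _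

theorem pvScanGo_snd (l : List Char) (i : Nat) (d b : Int) (neg : Bool) (f : Option (Nat × Bool)) :
    (pvScanGo l i d b neg f).2 = (neg || !pvIsRightGo l b) := by
  induction l generalizing i d b neg f with
  | nil => simp [pvScanGo, pvIsRightGo]
  | cons c r ih =>
    rw [pvScanGo, pvIsRightGo]
    by_cases hneg : (if c = '(' then b + 1 else b - 1) < 0
    · simp only [hneg, decide_true, Bool.or_true, if_pos hneg]
      split_ifs <;> simp_all [pvScanGo_snd_true]
    · simp only [hneg, decide_false, Bool.or_false, if_neg hneg]
      split_ifs <;> first | exact ih _ _ _ _ _ | simp_all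

theorem pvScanGo_fst (l : List Char) (i : Nat) (d b : Int) (neg : Bool) :
    (pvScanGo l i d b neg none).1 =
      match sFind l d i with
      | none => none
      | some j => some (j, !(neg || !pvIsRightGo (l.take (j - i)) b)) := by
  induction l generalizing i d b neg with
  | nil => simp [pvScanGo, sFind]
  | cons c r ih =>
    rw [pvScanGo, sFind]
    by_cases hz : (if c = '(' then d + 1 else if c = ')' then d - 1 else d) = 0
    · simp only [hz, if_pos, beq_self_eq_true, Option.isNone_none, Bool.true_and, if_true,
        decide_true]
      have htake : (c :: r).take (i + 1 - i) = [c] := by simp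
      have hfin : ∀ x : Option (Nat × Bool) × Bool,
          x.1 = some (i + 1, !(neg || decide ((if c = '(' then b + 1 else b - 1) < 0))) →
          x.1 = some (i + 1, !(neg || !pvIsRightGo ((c :: r).take (i + 1 - i)) b)) := by
        intro x hx
        rw [htake]
        simp only [pvIsRightGo]
        by_cases hb : (if c = '(' then b + 1 else b - 1) < 0
        · simpa [hb] using hx
        · simpa [hb] using hx
      refine hfin _ ?_
      split_ifs <;> first | rfl | rw [pvScanGo_found_some] | simp_all [pvScanGo_found_some]
    · rw [if_neg hz]
      simp only [Option.isNone_none, Bool.true_and, beq_iff_eq, hz, if_false,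
        Option.isSome_none, Bool.false_and, Bool.false_eq_true]
      rw [ih]
      cases hsf : sFind r (if c = '(' then d + 1 else if c = ')' then d - 1 else d) (i + 1) with
      | none => simp
      | some j =>
        have hj := sFind_bounds _ _ _ _ hsf
        simp only []
        have htake : (c :: r).take (j - i) = c :: r.take (j - (i + 1)) := by
          have : j - i = (j - (i + 1)) + 1 := by omega
          rw [this]; simp
        rw [htake]
        simp only [pvIsRightGo]
        by_cases hb : (if c = '(' then b + 1 else b - 1) < 0
        · simp [hb, pvScanGo_snd_true]
        · simp [hb]

theorem pvRecGo_eq (arr : List Char) :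
    pvRecGo arr =
      if arr = [] ∨ pvIsRight arr then arr
      else
        match sFind arr 0 0 with
        | none => []
        | some j =>
          if pvIsRight (arr.take j) then arr.take j ++ pvRecGo (arr.drop j)
          else ('(' :: pvRecGo (arr.drop j) ++ [')']) ++ ((arr.take j).drop 1).dropLast.map pvFlip := by
  rw [pvRecGo]
  by_cases hnr : arr = [] ∨ pvIsRight arr = true
  · simp [hnr]
  · rw [if_neg hnr, if_neg hnr]
    split
    · rename_i heq
      rw [← splitLoop_eq_sFind, heq]
    · rename_i i heq
      rw [← splitLoop_eq_sFind, heq]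
      simp only [PySem.List.foldl_append_singleton_eq_map]

theorem pvRecBGo_eq (arr : List Char) :
    pvRecBGo arr =
      if arr = [] then []
      else if pvIsRight arr then arr
      else
        match sFind arr 0 0 with
        | none => []
        | some j =>
          if pvIsRight (arr.take j) then arr.take j ++ pvRecBGo (arr.drop j)
          else '(' :: (pvRecBGo (arr.drop j) ++ ')' :: ((arr.take j).drop 1).dropLast.map pvFlip) := by
  cases hsf : sFind arr 0 0 with
  | none =>
    have hsc : pvScanGo arr 0 0 0 false none = (none, !pvIsRight arr) := by
      refine Prod.ext ?_ ?_
      · rw [pvScanGo_fst, hsf]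
      · rw [pvScanGo_snd]; simp [pvIsRight]
    rw [pvRecBGo]
    split
    rename_i found neg h
    rw [hsc] at h
    injection h with h1 h2
    subst h1; subst h2
    by_cases hnil : arr = []
    · simp [hnil]
    · by_cases hr : pvIsRight arr = true
      · simp [hnil, hr]
      · have hr' : pvIsRight arr = false := by simpa using hr
        have hfl : (fun c : Char => if c = '(' then ')' else '(') = pvFlip := rfl
        simp [hnil, hr', hfl]
  | some j =>
    have hsc : pvScanGo arr 0 0 0 false none =
        (some (j, pvIsRight (arr.take j)), !pvIsRight arr) := by
      refine Prod.ext ?_ ?_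
      · rw [pvScanGo_fst, hsf]; simp [pvIsRight]
      · rw [pvScanGo_snd]; simp [pvIsRight]
    rw [pvRecBGo]
    split
    rename_i found neg h
    rw [hsc] at h
    injection h with h1 h2
    subst h1; subst h2
    by_cases hnil : arr = []
    · simp [hnil]
    · by_cases hr : pvIsRight arr = true
      · simp [hnil, hr]
      · have hr' : pvIsRight arr = false := by simpa using hr
        have hfl : (fun c : Char => if c = '(' then ')' else '(') = pvFlip := rfl
        simp [hnil, hr', hfl]

theorem pvMain (arr : List Char) : pvRecGo arr = pvRecBGo arr := by
  have key : ∀ n, ∀ arr : List Char, arr.length ≤ n → pvRecGo arr = pvRecBGo arr := by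
    intro n
    induction n with
    | zero =>
      intro arr hlen
      have : arr = [] := List.eq_nil_of_length_eq_zero (by omega)
      subst this
      rw [pvRecGo_eq, pvRecBGo_eq]; simp
    | succ m ih =>
      intro arr hlen
      rw [pvRecGo_eq, pvRecBGo_eq]
      by_cases hnil : arr = []
      · subst hnil; simp
      · by_cases hr : pvIsRight arr
        · simp [hnil, hr]
        · simp only [hnil, hr, or_self, Bool.false_eq_true, if_false]
          cases hsf : sFind arr 0 0 with
          | none => simp
          | some j =>
            have hj := sFind_bounds _ _ _ _ hsf
            have hlt : (arr.drop j).length ≤ m := by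
              have : 1 ≤ arr.length := by
                cases arr with
                | nil => exact absurd rfl hnil
                | cons a t => simp
              simp only [List.length_drop]
              omega
            simp only [ih _ hlt]
            cases pvIsRight (arr.take j) <;> simp
  exact key arr.length arr le_rfl

-- ===== VERDICT (by name: the statement is the Claim_ definition above) =====
theorem recursion_spec : Claim_equal_recursion := by
  intro arr _ _
  unfold Spec_recursion recursion recursion_alt
  rw [pvMain]
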